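-- pv_equiv track=rewrite | github.com/ToanChoaa/CaroGame | Game.py | prioritize_moves
-- ===== SOURCE A (Python) =====
-- EMPTY = 0
--
-- PREFERRED_MOVES_3X3 = [
--     (1, 1),  # center
--     (0, 0), (0, 2), (2, 0), (2, 2),  # corners
--     (0, 1), (1, 0), (1, 2), (2, 1)   # edges
-- ]
--
-- def prioritize_moves(board):
--     """
--     Lấy danh sách nước đi ưu tiên dựa trên kích thước bàn cờ.
--     - Với 3x3: tái sử dụng logic ưu tiên từ heuristic.py (center -> corners -> edges)
--     - Với 9x9: sắp xếp theo khoảng cách Manhattan tới ô trung tâm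
--     """
--     moves = get_valid_locations(board)
--     rows, cols = len(board), len(board[0])
--
--     if rows == 3 and cols == 3:
--         prioritized = [pos for pos in PREFERRED_MOVES_3X3 if board[pos[0]][pos[1]] == EMPTY]
--         remaining = [move for move in moves if move not in prioritized]
--         return prioritized + remaining
--
--     center_r, center_c = rows // 2, cols // 2
--     return sorted(
--         moves,
--         key=lambda move: abs(move[0] - center_r) + abs(move[1] - center_c)
--     )
--
-- def get_valid_locations(board):
--     valid_locations = []
--     for r in range(len(board)):
--         for c in range(len(board[0])):
--             if board[r][c] == EMPTY:
--                 valid_locations.append((r, c))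
--     return valid_locations
-- ===== SOURCE B (Python) =====
-- EMPTY = 0
--
-- PREFERRED_MOVES_3X3 = [
--     (1, 1),
--     (0, 0), (0, 2), (2, 0), (2, 2),
--     (0, 1), (1, 0), (1, 2), (2, 1)
-- ]
--
-- def prioritize_moves(board):
--     rows, cols = len(board), len(board[0])
--     empties = [(r, c) for r in range(rows) for c in range(cols) if board[r][c] == EMPTY]
--     if rows == 3 and cols == 3:
--         pref = [p for p in PREFERRED_MOVES_3X3 if p in empties]
--         rest = [m for m in empties if m not in pref]
--         return pref + rest
--     cr, cc = rows // 2, cols // 2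
--     maxd = max(cr, rows - 1 - cr) + max(cc, cols - 1 - cc)
--     buckets = [[] for _ in range(maxd + 1)]
--     for r, c in empties:
--         buckets[abs(r - cr) + abs(c - cc)].append((r, c))
--     return [m for b in buckets for m in b]
-- ===== Notes on version B (the rewrite author's own statement) =====
-- stated objective: alternative
-- what changed: The general branch's comparison sort sorted(moves, key=Manhattan distance) is replaced by a counting/bucket sort: empty cells are appended in row-major order to buckets indexed by their distance to the centre and the buckets are concatenated in ascending distance, which reproduces the stable sort's tie order exactly; the empty-cell scan becomes a single comprehension.
import Mathlib
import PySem

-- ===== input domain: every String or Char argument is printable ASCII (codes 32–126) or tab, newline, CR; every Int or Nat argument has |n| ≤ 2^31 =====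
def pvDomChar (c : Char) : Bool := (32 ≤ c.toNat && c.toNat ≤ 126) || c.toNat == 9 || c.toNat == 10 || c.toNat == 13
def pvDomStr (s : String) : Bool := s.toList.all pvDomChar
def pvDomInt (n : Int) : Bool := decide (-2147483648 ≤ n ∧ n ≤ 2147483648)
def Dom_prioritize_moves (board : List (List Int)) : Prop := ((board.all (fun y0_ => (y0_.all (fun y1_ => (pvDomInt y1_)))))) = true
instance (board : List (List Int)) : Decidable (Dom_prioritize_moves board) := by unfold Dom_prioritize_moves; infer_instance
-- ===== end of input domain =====

-- B replaces A's comparison sort 'sorted(moves, key=Manhattan distance)' by a counting/bucket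
-- sort over the distance range (same output, including the stable tie order); objective: alternative.

-- shared module constant (PREFERRED_MOVES_3X3) and the board[r][c] accessor
def pvPreferred3x3 : List (Int × Int) :=
  [(1, 1), (0, 0), (0, 2), (2, 0), (2, 2), (0, 1), (1, 0), (1, 2), (2, 1)]

def pvRow (board : List (List Int)) (r : Int) : List Int :=
  (PySem.List.pyGet? board r).getD []

def pvCell (board : List (List Int)) (r c : Int) : Int :=
  (PySem.List.pyGet? (pvRow board r) c).getD 0

-- ===== PORT A =====
def get_valid_locations (board : List (List Int)) : List (Int × Int) :=
  (PySem.List.pyRange 0 (board.length : Int) 1).foldl (fun acc r =>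
    (PySem.List.pyRange 0 ((pvRow board 0).length : Int) 1).foldl (fun acc2 c =>
      if pvCell board r c == 0 then acc2 ++ [(r, c)] else acc2) acc) []

def prioritize_moves (board : List (List Int)) : List (Int × Int) :=
  let moves := get_valid_locations board
  let rows : Int := board.length
  let cols : Int := (pvRow board 0).length
  if rows == 3 && cols == 3 then
    let prioritized := pvPreferred3x3.filter (fun pos => pvCell board pos.1 pos.2 == 0)
    let remaining := moves.filter (fun m => !(prioritized.contains m))
    prioritized ++ remaining
  else
    let cr := PySem.Int.floordiv rows 2
    let cc := PySem.Int.floordiv cols 2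
    PySem.List.sorted moves (fun m => |m.1 - cr| + |m.2 - cc|)

-- ===== PORT B =====
def prioritize_moves_alt (board : List (List Int)) : List (Int × Int) :=
  let rows : Int := board.length
  let cols : Int := (pvRow board 0).length
  let empties := (PySem.List.pyRange 0 rows 1).flatMap (fun r =>
    ((PySem.List.pyRange 0 cols 1).filter (fun c => pvCell board r c == 0)).map (fun c => (r, c)))
  if rows == 3 && cols == 3 then
    let pref := pvPreferred3x3.filter (fun p => empties.contains p)
    let rest := empties.filter (fun m => !(pref.contains m))
    pref ++ rest
  else
    let cr := PySem.Int.floordiv rows 2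
    let cc := PySem.Int.floordiv cols 2
    let maxd := max cr (rows - 1 - cr) + max cc (cols - 1 - cc)
    let filled := empties.foldl (fun bs m =>
      bs.set (|m.1 - cr| + |m.2 - cc|).toNat
        (bs.getD (|m.1 - cr| + |m.2 - cc|).toNat [] ++ [m]))
      (List.replicate (maxd + 1).toNat ([] : List (Int × Int)))
    filled.flatMap (fun b => b)

-- ===== PRECONDITION & SPEC =====
-- Pre_ excludes exactly the inputs where Python A raises IndexError: the empty board
-- (board[0]) and ragged boards having a row shorter than row 0 (board[r][c]).
def Pre_prioritize_moves (board : List (List Int)) : Prop :=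
  board ≠ [] ∧ ∀ row ∈ board, (board.headD []).length ≤ row.length
instance (board : List (List Int)) : Decidable (Pre_prioritize_moves board) := by
  unfold Pre_prioritize_moves; infer_instance

def pvWitness_prioritize_moves : List (List Int) := [[0, 1], [2, 0]]

def Spec_prioritize_moves (board : List (List Int)) (out : List (Int × Int)) : Prop := out = prioritize_moves_alt board
instance (board : List (List Int)) (out : List (Int × Int)) : Decidable (Spec_prioritize_moves board out) := by unfold Spec_prioritize_moves; infer_instance

-- ===== CLAIM (what is proved, stated in full; the proofs are below) =====
def Claim_equal_prioritize_moves : Prop := ∀ (board : List (List Int)), Dom_prioritize_moves board → Pre_prioritize_moves board → Spec_prioritize_moves board (prioritize_moves board)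

-- ===== LEMMAS AND PROOFS =====

-- the row-major list of empty cells, as B's comprehension builds it
def pvE (board : List (List Int)) : List (Int × Int) :=
  (PySem.List.pyRange 0 (board.length : Int) 1).flatMap (fun r =>
    ((PySem.List.pyRange 0 ((pvRow board 0).length : Int) 1).filter
        (fun c => pvCell board r c == 0)).map (fun c => (r, c)))

lemma get_valid_eq_pvE (board : List (List Int)) :
    get_valid_locations board = pvE board := by
  unfold get_valid_locations pvE
  simp only [PySem.List.foldl_append_if, PySem.List.foldl_append_eq_flatMap]
  simp

lemma mem_pvE (board : List (List Int)) (r c : Int) :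
    (r, c) ∈ pvE board ↔
      (0 ≤ r ∧ r < (board.length : Int) ∧ 0 ≤ c ∧ c < ((pvRow board 0).length : Int) ∧
        pvCell board r c = 0) := by
  unfold pvE
  simp [List.mem_flatMap, List.mem_map, List.mem_filter, PySem.List.mem_pyRange_one,
    Prod.mk.injEq]
  tauto

-- stable insertion puts x after all keys ≤ its own and before all strictly larger keys
lemma pv_insertBy_middle {α : Type} (key : α → Int) (x : α) (as bs : List α)
    (ha : ∀ a ∈ as, ¬ key x < key a) (hb : ∀ b ∈ bs, key x < key b) :
    PySem.List.insertBy (fun a b => decide (key a < key b)) x (as ++ bs) = as ++ x :: bs := by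
  induction as with
  | nil =>
    cases bs with
    | nil => rfl
    | cons b bs' =>
      simp [PySem.List.insertBy, hb b (by simp)]
  | cons a as' ih =>
    have h1 : ¬ key x < key a := ha a (by simp)
    simp [PySem.List.insertBy, h1]
    exact ih (fun a' h => ha a' (by simp [h]))

-- Python's stable sort by an Int key = concatenation of the key buckets in ascending key order
lemma pv_sorted_eq_flatMap_filter {α : Type} (key : α → Int) (xs : List α) (ds : List Int)
    (hd : ds.Pairwise (· < ·)) (hcov : ∀ x ∈ xs, key x ∈ ds) :
    PySem.List.sorted xs key = ds.flatMap (fun d => xs.filter (fun x => key x == d)) := by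
  induction xs using List.reverseRecOn with
  | nil => simp [PySem.List.sorted]
  | append_singleton xs x ih =>
    have hcov' : ∀ y ∈ xs, key y ∈ ds := fun y h => hcov y (by simp [h])
    have hx : key x ∈ ds := hcov x (by simp)
    obtain ⟨ds₁, ds₂, rfl⟩ := List.append_of_mem hx
    rw [List.pairwise_append] at hd
    obtain ⟨hd₁, hd₂, hcross⟩ := hd
    rw [List.pairwise_cons] at hd₂
    obtain ⟨hlt₂, hd₂'⟩ := hd₂
    have hlt₁ : ∀ d ∈ ds₁, d < key x := fun d h => hcross d h (key x) (by simp)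
    have hL : PySem.List.sorted (xs ++ [x]) key
        = PySem.List.insertBy (fun a b => decide (key a < key b)) x (PySem.List.sorted xs key) := by
      rw [PySem.List.sorted_eq_foldl_insertBy, PySem.List.sorted_eq_foldl_insertBy,
        List.foldl_append]
      rfl
    rw [hL, ih hcov']
    set F := fun d => xs.filter (fun y => key y == d) with hF
    have hsplit : (ds₁ ++ key x :: ds₂).flatMap F
        = (ds₁.flatMap F ++ F (key x)) ++ ds₂.flatMap F := by
      simp [List.flatMap_append]
    rw [hsplit, pv_insertBy_middle key x]
    · have h1 : ds₁.flatMap (fun d => (xs ++ [x]).filter (fun y => key y == d))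
          = ds₁.flatMap F := by
        refine List.flatMap_congr (fun d hd => ?_)
        have hne : (key x == d) = false := by
          have := hlt₁ d hd; simp; omega
        simp [List.filter_append, hF, List.filter, hne]
      have h2 : ds₂.flatMap (fun d => (xs ++ [x]).filter (fun y => key y == d))
          = ds₂.flatMap F := by
        refine List.flatMap_congr (fun d hd => ?_)
        have hne : (key x == d) = false := by
          have := hlt₂ d hd; simp; omega
        simp [List.filter_append, hF, List.filter, hne]
      have h3 : (xs ++ [x]).filter (fun y => key y == key x) = F (key x) ++ [x] := by
        simp [List.filter_append, hF, List.filter]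
      rw [List.flatMap_append, List.flatMap_cons, h1, h2, h3]
      simp
    · intro a hamem
      rcases List.mem_append.1 hamem with h | h
      · obtain ⟨d, hd, hmem⟩ := List.mem_flatMap.1 h
        have := List.of_mem_filter hmem
        have hkey : key a = d := by simpa using this
        have := hlt₁ d hd
        omega
      · have := List.of_mem_filter h
        have hkey : key a = key x := by simpa using this
        omega
    · intro b hbmem
      obtain ⟨d, hd, hmem⟩ := List.mem_flatMap.1 hbmem
      have := List.of_mem_filter hmem
      have hkey : key b = d := by simpa using this
      have := hlt₂ d hd
      omega

lemma pv_range_map_getD {α : Type} (bs : List (List α)) :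
    (List.range bs.length).map (fun j => bs.getD j []) = bs := by
  apply List.ext_getElem
  · simp
  · intro i h1 h2
    simp [List.getD_eq_getElem?_getD, List.getElem?_eq_getElem h2]

-- the bucket-filling fold, characterised bucket by bucket
lemma pv_foldl_bucket {α : Type} (f : α → Int) (xs : List α) (bs : List (List α))
    (h : ∀ x ∈ xs, 0 ≤ f x ∧ (f x).toNat < bs.length) :
    xs.foldl (fun b x => b.set (f x).toNat (b.getD (f x).toNat [] ++ [x])) bs
      = (List.range bs.length).map
          (fun j => bs.getD j [] ++ xs.filter (fun x => f x == (j : Int))) := by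
  induction xs generalizing bs with
  | nil => simpa [List.getD_eq_getElem?_getD] using (pv_range_map_getD bs).symm
  | cons x xs ih =>
    obtain ⟨hx0, hxlt⟩ := h x (by simp)
    set k := (f x).toNat with hk
    set bs' := bs.set k (bs.getD k [] ++ [x]) with hbs'
    have hlen : bs'.length = bs.length := by simp [hbs']
    rw [List.foldl_cons]
    rw [ih bs' (fun y hy => by rw [hlen]; exact h y (by simp [hy]))]
    rw [hlen]
    refine List.map_congr_left (fun j hj => ?_)
    have hjlt : j < bs.length := List.mem_range.mp hj
    have hget : bs'.getD j [] = bs.getD j [] ++ (if f x == (j : Int) then [x] else []) := by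
      by_cases hjk : j = k
      · subst hjk
        have htr : (f x == ((f x).toNat : Int)) = true := by simp; omega
        rw [List.getD_eq_getElem?_getD, List.getElem?_set_self hxlt]
        simp; omega
      · have hfa : (f x == (j : Int)) = false := by simp; omega
        rw [List.getD_eq_getElem?_getD, List.getElem?_set_ne (by omega),
          ← List.getD_eq_getElem?_getD]
        simp [hfa]
    rw [hget, List.filter_cons]
    by_cases hc : (f x == (j : Int)) = true <;> simp [hc]

lemma pv_main (board : List (List Int)) (hpre : Pre_prioritize_moves board) :
    prioritize_moves board = prioritize_moves_alt board := by
  obtain ⟨hne, _⟩ := hpre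
  have hlen : 1 ≤ board.length := by cases board <;> simp_all
  simp only [prioritize_moves, prioritize_moves_alt, get_valid_eq_pvE]
  rw [show ((PySem.List.pyRange 0 (board.length : Int) 1).flatMap (fun r =>
    ((PySem.List.pyRange 0 ((pvRow board 0).length : Int) 1).filter
        (fun c => pvCell board r c == 0)).map (fun c => (r, c)))) = pvE board from rfl]
  split_ifs with h3
  · -- 3x3 branch: prioritized/pref agree element by element, then the rests coincide
    have hR : board.length = 3 := by simp at h3; exact_mod_cast h3.1
    have hC : (pvRow board 0).length = 3 := by simp at h3; exact_mod_cast h3.2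
    have hpref : pvPreferred3x3.filter (fun pos => pvCell board pos.1 pos.2 == 0)
        = pvPreferred3x3.filter (fun p => (pvE board).contains p) := by
      refine List.filter_congr (fun p hp => ?_)
      fin_cases hp <;>
        · rw [Bool.eq_iff_iff]
          simp [mem_pvE, hR, hC]
    rw [hpref]
  · -- general branch: the bucket fold = per-distance filters; stable sort = their concatenation
    set rows : Int := (board.length : Int) with hrows
    set cols : Int := ((pvRow board 0).length : Int) with hcols
    set cr := PySem.Int.floordiv rows 2 with hcr
    set cc := PySem.Int.floordiv cols 2 with hcc
    set maxd := max cr (rows - 1 - cr) + max cc (cols - 1 - cc) with hmaxd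
    have hcr' : cr = rows / 2 := PySem.Int.floordiv_eq_ediv_of_pos (by omega)
    have hcc' : cc = cols / 2 := PySem.Int.floordiv_eq_ediv_of_pos (by omega)
    have hrows1 : 1 ≤ rows := by rw [hrows]; exact_mod_cast hlen
    have hcols0 : 0 ≤ cols := by rw [hcols]; positivity
    have hM1a : cr ≤ max cr (rows - 1 - cr) := le_max_left _ _
    have hM1b : rows - 1 - cr ≤ max cr (rows - 1 - cr) := le_max_right _ _
    have hM2a : cc ≤ max cc (cols - 1 - cc) := le_max_left _ _
    have hM2b : cols - 1 - cc ≤ max cc (cols - 1 - cc) := le_max_right _ _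
    set key : Int × Int → Int := fun m => |m.1 - cr| + |m.2 - cc| with hkey
    have hbnd : ∀ m ∈ pvE board, 0 ≤ key m ∧ (key m).toNat < (maxd + 1).toNat := by
      rintro ⟨a, b⟩ hm
      obtain ⟨h1, h2, h3, h4, _⟩ := (mem_pvE board a b).1 hm
      rw [← hrows] at h2; rw [← hcols] at h4
      simp only [hkey]
      rw [Int.abs_eq_natAbs, Int.abs_eq_natAbs]
      constructor
      · positivity
      · omega
    rw [pv_foldl_bucket key (pvE board) (List.replicate (maxd + 1).toNat [])
      (by simpa using hbnd)]
    simp only [List.length_replicate]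
    rw [pv_sorted_eq_flatMap_filter key (pvE board)
      ((List.range (maxd + 1).toNat).map (fun j : Nat => (j : Int)))
      (by
        rw [List.pairwise_map]
        exact List.pairwise_lt_range.imp (fun h => by exact_mod_cast h))
      (by
        intro m hm
        obtain ⟨h0, hlt⟩ := hbnd m hm
        simp only [List.mem_map]
        exact ⟨(key m).toNat, List.mem_range.mpr hlt, by omega⟩)]
    simp only [List.flatMap_map]
    refine List.flatMap_congr (fun j hj => ?_)
    simp [List.getD_eq_getElem?_getD, List.getElem?_replicate]
    split <;> rfl

-- ===== VERDICT (by name: the statement is the Claim_ definition above) =====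
theorem prioritize_moves_spec : Claim_equal_prioritize_moves := by
  intro board _ hpre
  unfold Spec_prioritize_moves
  exact pv_main board hpre
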